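-- pv_equiv track=rewrite | github.com/abinbaisil003/aptitude_test | evaluate_string.py | strcheck
-- ===== SOURCE A (Python) =====
-- def strcheck(str1, sub_str):
--     count=0
--     if len(str1) >= 8:
--         if any(ele.isupper() for ele in str1):
--             if any(char.isdigit() for char in str1):
--                 if any(not c.isalnum() for c in str1):
--                     for i in sub_str:
--                         if i in str1:
--                             count+=1
--                     if count==0:
--                         return True
--         return False
-- ===== SOURCE B (Python) =====
-- def strcheck(str1, sub_str):
--     if len(str1) < 8:
--         return None
--     has_upper = has_digit = has_special = False
--     for c in str1:
--         if c.isupper():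
--             has_upper = True
--         if c.isdigit():
--             has_digit = True
--         if not c.isalnum():
--             has_special = True
--     return has_upper and has_digit and has_special and not any(s in str1 for s in sub_str)
-- ===== Notes on version B (the rewrite author's own statement) =====
-- stated objective: simpler
-- what changed: Early return on short passwords, then one fused pass over the string accumulating the three character-class flags (instead of three independent any() scans) and a single any() over sub_str replacing the counting loop; nested-if chain becomes one boolean expression.
import Mathlib
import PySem

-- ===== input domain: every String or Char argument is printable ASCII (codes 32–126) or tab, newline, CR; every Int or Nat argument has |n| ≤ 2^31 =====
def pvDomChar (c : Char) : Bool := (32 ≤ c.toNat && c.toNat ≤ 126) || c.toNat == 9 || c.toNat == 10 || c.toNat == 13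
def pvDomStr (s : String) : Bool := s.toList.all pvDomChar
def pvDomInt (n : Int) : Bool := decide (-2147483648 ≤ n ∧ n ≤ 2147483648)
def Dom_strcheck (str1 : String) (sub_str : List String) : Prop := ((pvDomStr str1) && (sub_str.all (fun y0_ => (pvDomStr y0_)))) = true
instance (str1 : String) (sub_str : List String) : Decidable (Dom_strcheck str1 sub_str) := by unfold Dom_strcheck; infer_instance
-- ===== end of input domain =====

-- B: early return on short passwords, then one fused pass accumulating the three
-- character-class flags and a single any() over sub_str instead of the counting loop (simpler).


-- ===== PORT A =====
def strcheck (str1 : String) (sub_str : List String) : Option Bool :=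
  -- count=0; if len(str1) >= 8: nested any() checks, counting loop, fall-through False; else None
  let count : Int := 0
  if PySem.Str.len str1 ≥ 8 then
    if str1.toList.any (fun ele => PySem.Chars.isupper ele) then
      if str1.toList.any (fun ch => PySem.Chars.isdigit ch) then
        if str1.toList.any (fun c => !PySem.Chars.isalnum c) then
          let count := sub_str.foldl (fun cnt i => if PySem.Str.isIn i str1 then cnt + 1 else cnt) count
          if count == 0 then some true else some false
        else some false
      else some false
    else some false
  else none

-- ===== PORT B =====
def strcheck_alt (str1 : String) (sub_str : List String) : Option Bool :=
  if PySem.Str.len str1 < 8 then none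
  else
    let flags := str1.toList.foldl
      (fun (acc : Bool × Bool × Bool) c =>
        (if PySem.Chars.isupper c then true else acc.1,
         if PySem.Chars.isdigit c then true else acc.2.1,
         if !PySem.Chars.isalnum c then true else acc.2.2))
      (false, false, false)
    some (flags.1 && flags.2.1 && flags.2.2 &&
      !(sub_str.any (fun s => PySem.Str.isIn s str1)))

-- ===== PRECONDITION & SPEC =====
def Spec_strcheck (str1 : String) (sub_str : List String) (out : Option Bool) : Prop := out = strcheck_alt str1 sub_str
instance (str1 : String) (sub_str : List String) (out : Option Bool) : Decidable (Spec_strcheck str1 sub_str out) := by unfold Spec_strcheck; infer_instance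

-- ===== CLAIM (what is proved, stated in full; the proofs are below) =====
def Claim_equal_strcheck : Prop := ∀ (str1 : String) (sub_str : List String), Dom_strcheck str1 sub_str → Spec_strcheck str1 sub_str (strcheck str1 sub_str)

-- ===== LEMMAS AND PROOFS =====

-- B's fused flag fold computes the three independent any() scans of A.
theorem flags_fold_eq (l : List Char) (a b c : Bool) :
    l.foldl (fun (acc : Bool × Bool × Bool) ch =>
        (if PySem.Chars.isupper ch then true else acc.1,
         if PySem.Chars.isdigit ch then true else acc.2.1,
         if !PySem.Chars.isalnum ch then true else acc.2.2)) (a, b, c)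
    = (a || l.any (fun x => PySem.Chars.isupper x),
       b || l.any (fun x => PySem.Chars.isdigit x),
       c || l.any (fun x => !PySem.Chars.isalnum x)) := by
  induction l generalizing a b c with
  | nil => simp
  | cons h t ih =>
    simp only [List.foldl_cons, ih, List.any_cons]
    by_cases h1 : PySem.Chars.isupper h <;>
      by_cases h2 : PySem.Chars.isdigit h <;>
        by_cases h3 : PySem.Chars.isalnum h <;>
          simp [h1, h2, h3]

-- A's counting loop yields 0 exactly when no sub_str element occurs in str1.
theorem count_fold_eq_zero_iff (str1 : String) (l : List String) (c : Int) (hc : 0 ≤ c) :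
    (l.foldl (fun cnt i => if PySem.Chars.isIn i.toList str1.toList then cnt + 1 else cnt) c = 0)
      ↔ (c = 0 ∧ l.any (fun s => PySem.Chars.isIn s.toList str1.toList) = false) := by
  induction l generalizing c with
  | nil => simp
  | cons h t ih =>
    simp only [List.foldl_cons, List.any_cons]
    cases hb : PySem.Chars.isIn h.toList str1.toList
    · rw [if_neg (by simp), ih c hc]
      simp
    · rw [if_pos (by simp), ih (c + 1) (by omega)]
      simp only [Bool.true_or]
      constructor
      · rintro ⟨h1, -⟩; omega
      · rintro ⟨-, h2⟩; simp at h2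

-- ===== VERDICT (by name: the statement is the Claim_ definition above) =====
theorem strcheck_spec : Claim_equal_strcheck := by
  intro str1 sub_str _
  unfold Spec_strcheck strcheck strcheck_alt
  simp only [PySem.Str.isIn_eq, flags_fold_eq, Bool.false_or]
  by_cases hlen : PySem.Str.len str1 ≥ 8
  · have hlen' : ¬ PySem.Str.len str1 < 8 := by omega
    rw [if_pos hlen, if_neg hlen']
    by_cases h1 : str1.toList.any (fun x => PySem.Chars.isupper x) <;>
      by_cases h2 : str1.toList.any (fun x => PySem.Chars.isdigit x) <;>
        by_cases h3 : str1.toList.any (fun x => !PySem.Chars.isalnum x) <;>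
          simp only [h1, h2, h3, Bool.true_and, Bool.false_and,
            Bool.and_false, Bool.and_true, if_true] <;>
          try rfl
    by_cases hin : sub_str.any (fun s => PySem.Chars.isIn s.toList str1.toList)
    · have hne : sub_str.foldl (fun cnt i => if PySem.Chars.isIn i.toList str1.toList then cnt + 1 else cnt) (0:Int) ≠ 0 := by
        intro h
        rw [count_fold_eq_zero_iff str1 sub_str 0 le_rfl] at h
        rw [hin] at h
        simp at h
      rw [if_neg (by simpa using hne), hin]
      rfl
    · have hz : sub_str.foldl (fun cnt i => if PySem.Chars.isIn i.toList str1.toList then cnt + 1 else cnt) (0:Int) = 0 := by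
        rw [count_fold_eq_zero_iff str1 sub_str 0 le_rfl]
        exact ⟨rfl, by simpa using hin⟩
      rw [Bool.not_eq_true] at hin
      rw [if_pos (by simpa using hz), hin]
      rfl
  · rw [if_neg hlen, if_pos (by omega : PySem.Str.len str1 < 8)]
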